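-- pv_equiv track=rewrite | github.com/Jagan0606/CSA5120-Cryptography-and-Network-Security | c5 Caesar cipher - Copy.py | build_cipher_from_keyword
-- ===== SOURCE A (Python) =====
-- def build_cipher_from_keyword(keyword):
--     keyword = ''.join(ch.upper() for ch in keyword if ch.isalpha())
--     seen=set()
--     cipher=[]
--     for ch in keyword:
--         if ch not in seen:
--             seen.add(ch); cipher.append(ch)
--     for ch in "ABCDEFGHIJKLMNOPQRSTUVWXYZ":
--         if ch not in seen:
--             cipher.append(ch)
--     plain = list("ABCDEFGHIJKLMNOPQRSTUVWXYZ")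
--     mapping = {p:c for p,c in zip(plain,cipher)}
--     inv = {c:p for p,c in mapping.items()}
--     return mapping,inv
-- ===== SOURCE B (Python) =====
-- def build_cipher_from_keyword(keyword):
--     alphabet = "ABCDEFGHIJKLMNOPQRSTUVWXYZ"
--     uniq = list(dict.fromkeys(c.upper() for c in keyword if c.isalpha()))
--
--     def rank(c):
--         # keyword letters sort first, by first-occurrence position; the rest by char code
--         return uniq.index(c) if c in uniq else len(uniq) + ord(c)
--
--     cipher = sorted(alphabet, key=rank)
--     mapping = dict(zip(alphabet, cipher))
--     inv = dict(zip(cipher, alphabet))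
--     return mapping, inv
-- ===== Notes on version B (the rewrite author's own statement) =====
-- stated objective: alternative
-- what changed: B never builds the cipher sequence by scanning and appending: it assigns every alphabet letter a numeric rank (first-occurrence position in the keyword, or len+charcode for the rest) and obtains the cipher order as one key-sort of the fixed alphabet, then builds both dicts with dict(zip(...)) instead of A's seen-set loop, second alphabet scan and dict comprehensions.
import Mathlib
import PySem

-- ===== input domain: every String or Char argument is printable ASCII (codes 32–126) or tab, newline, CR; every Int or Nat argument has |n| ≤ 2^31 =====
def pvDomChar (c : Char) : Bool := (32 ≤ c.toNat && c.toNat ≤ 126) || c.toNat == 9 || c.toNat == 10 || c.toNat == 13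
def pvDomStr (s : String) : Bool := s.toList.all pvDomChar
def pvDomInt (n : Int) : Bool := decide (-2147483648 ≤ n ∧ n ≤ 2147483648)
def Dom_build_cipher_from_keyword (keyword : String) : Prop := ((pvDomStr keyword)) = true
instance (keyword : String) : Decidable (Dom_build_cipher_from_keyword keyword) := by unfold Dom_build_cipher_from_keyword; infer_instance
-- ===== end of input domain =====

-- B derives the cipher order by ranking each alphabet letter (keyword first-occurrence position, else
-- len+charcode) and performing one key-sort of the fixed alphabet, instead of A's seen-set scan-and-append
-- loops; both dicts come from dict(zip(...)) (alternative decomposition; return value only).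

-- ===== PORT A =====
-- the alphabet literal used by both Pythons
def pvAlpha : List Char := "ABCDEFGHIJKLMNOPQRSTUVWXYZ".toList

def build_cipher_from_keyword (keyword : String) : (List (String × String)) × (List (String × String)) :=
  -- keyword = ''.join(ch.upper() for ch in keyword if ch.isalpha())
  let kw : List Char := (keyword.toList.filter PySem.Chars.isalpha).map PySem.Chars.upperChar
  -- seen=set(); cipher=[]; for ch in keyword: if ch not in seen: seen.add(ch); cipher.append(ch)
  let sc : PySem.Set Char × List Char :=
    kw.foldl (fun sc ch =>
      if PySem.Set.contains sc.1 ch then sc else (PySem.Set.add sc.1 ch, sc.2 ++ [ch]))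
      (PySem.Set.empty, [])
  -- for ch in "A..Z": if ch not in seen: cipher.append(ch)
  let cipher : List Char :=
    pvAlpha.foldl (fun acc ch => if PySem.Set.contains sc.1 ch then acc else acc ++ [ch]) sc.2
  -- mapping = {p:c for p,c in zip(plain,cipher)}
  let mapping : PySem.Dict String String :=
    (pvAlpha.zip cipher).foldl (fun d p => d.insert (String.ofList [p.1]) (String.ofList [p.2])) PySem.Dict.empty
  -- inv = {c:p for p,c in mapping.items()}
  let inv : PySem.Dict String String :=
    mapping.items.foldl (fun d p => d.insert p.2 p.1) PySem.Dict.empty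
  (mapping.items, inv.items)

-- ===== PORT B =====
def build_cipher_from_keyword_alt (keyword : String) : (List (String × String)) × (List (String × String)) :=
  -- uniq = list(dict.fromkeys(c.upper() for c in keyword if c.isalpha()))
  let uniq : List Char := PySem.List.dedup ((keyword.toList.filter PySem.Chars.isalpha).map PySem.Chars.upperChar)
  -- rank(c) = uniq.index(c) if c in uniq else len(uniq) + ord(c)
  let rank : Char → Int := fun c =>
    match PySem.List.index? uniq c with
    | some i => (i : Int)
    | none => (uniq.length : Int) + (c.toNat : Int)
  -- cipher = sorted(alphabet, key=rank)
  let cipher : List Char := PySem.List.sorted pvAlpha rank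
  -- mapping = dict(zip(alphabet, cipher)); inv = dict(zip(cipher, alphabet))
  let mapping : PySem.Dict String String :=
    PySem.Dict.ofList ((pvAlpha.zip cipher).map (fun p => (String.ofList [p.1], String.ofList [p.2])))
  let inv : PySem.Dict String String :=
    PySem.Dict.ofList ((cipher.zip pvAlpha).map (fun p => (String.ofList [p.1], String.ofList [p.2])))
  (mapping.items, inv.items)

-- ===== PRECONDITION & SPEC =====
def Spec_build_cipher_from_keyword (keyword : String) (out : (List (String × String)) × (List (String × String))) : Prop := out = build_cipher_from_keyword_alt keyword
instance (keyword : String) (out : (List (String × String)) × (List (String × String))) : Decidable (Spec_build_cipher_from_keyword keyword out) := by unfold Spec_build_cipher_from_keyword; infer_instance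

-- ===== CLAIM (what is proved, stated in full; the proofs are below) =====
def Claim_equal_build_cipher_from_keyword : Prop := ∀ (keyword : String), Dom_build_cipher_from_keyword keyword → Spec_build_cipher_from_keyword keyword (build_cipher_from_keyword keyword)

-- ===== LEMMAS AND PROOFS =====

-- A's first loop keeps seen and cipher equal and computes Set.ofList
lemma pv_pairfold (l : List Char) (s : List Char) :
    l.foldl (fun sc ch =>
      if PySem.Set.contains sc.1 ch then sc else (PySem.Set.add sc.1 ch, sc.2 ++ [ch])) (s, s)
    = (l.foldl PySem.Set.add s, l.foldl PySem.Set.add s) := by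
  induction l generalizing s with
  | nil => rfl
  | cons ch t ih =>
    simp only [List.foldl_cons]
    by_cases h : PySem.Set.contains s ch = true
    · have ha : PySem.Set.add s ch = s := by simp [PySem.Set.add, PySem.Set.contains] at h ⊢; simp [h]
      rw [if_pos h, ha]
      exact ih s
    · have ha : PySem.Set.add s ch = s ++ [ch] := by
        simp [PySem.Set.add, PySem.Set.contains] at h ⊢
        simp [h]
      rw [if_neg h, ha]
      exact ih (s ++ [ch])

-- A's second loop appends exactly the letters outside the seen set
lemma pv_skipfold (u : PySem.Set Char) (l acc : List Char) :
    l.foldl (fun acc ch => if PySem.Set.contains u ch then acc else acc ++ [ch]) acc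
    = acc ++ l.filter (fun ch => !PySem.Set.contains u ch) := by
  induction l generalizing acc with
  | nil => simp
  | cons ch t ih =>
    simp only [List.foldl_cons]
    by_cases h : PySem.Set.contains u ch = true
    · rw [if_pos h, ih acc]
      have hm : ch ∈ u := by simpa using h
      simp [hm]
    · rw [if_neg h, ih (acc ++ [ch])]
      have hm : ch ∉ u := by simpa using h
      simp [hm]

-- map fst/snd of a zip is a sublist of the respective side
lemma pv_zip_fst_sublist {α β : Type} (l₁ : List α) (l₂ : List β) :
    ((l₁.zip l₂).map Prod.fst).Sublist l₁ := by
  induction l₁ generalizing l₂ with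
  | nil => simp
  | cons a t ih =>
    cases l₂ with
    | nil => simp
    | cons b s => simpa using List.Sublist.cons₂ a (ih s)

lemma pv_zip_snd_sublist {α β : Type} (l₁ : List α) (l₂ : List β) :
    ((l₁.zip l₂).map Prod.snd).Sublist l₂ := by
  induction l₁ generalizing l₂ with
  | nil => simp
  | cons a t ih =>
    cases l₂ with
    | nil => simp
    | cons b s => simpa using List.Sublist.cons₂ b (ih s)

lemma pv_mk_inj : Function.Injective (fun c : Char => String.ofList [c]) := by
  intro a b h
  simpa using congrArg String.toList h

-- the common intermediate values
def pvU (keyword : String) : List Char :=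
  PySem.Set.ofList ((keyword.toList.filter PySem.Chars.isalpha).map PySem.Chars.upperChar)

def pvCipher (keyword : String) : List Char :=
  pvU keyword ++ pvAlpha.filter (fun ch => !PySem.Set.contains (pvU keyword) ch)

def pvMapped (keyword : String) : List (String × String) :=
  (pvAlpha.zip (pvCipher keyword)).map (fun p => (String.ofList [p.1], String.ofList [p.2]))

def pvInvd (keyword : String) : List (String × String) :=
  (pvAlpha.zip (pvCipher keyword)).map (fun p => (String.ofList [p.2], String.ofList [p.1]))

lemma pv_nodup_alpha : pvAlpha.Nodup := by decide

lemma pv_nodup_cipher (keyword : String) : (pvCipher keyword).Nodup := by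
  unfold pvCipher
  refine List.Nodup.append (PySem.Set.nodup_ofList _) (pv_nodup_alpha.filter _) ?_
  intro x hx hmem
  have := List.of_mem_filter hmem
  simp only [PySem.Set.contains, Bool.not_eq_true', List.contains_eq_mem, decide_eq_false_iff_not] at this
  exact this hx

lemma pv_nodup_keys (keyword : String) :
    ((pvAlpha.zip (pvCipher keyword)).map (fun p : Char × Char => String.ofList [p.1])).Nodup := by
  have : ((pvAlpha.zip (pvCipher keyword)).map (fun p : Char × Char => String.ofList [p.1]))
      = (((pvAlpha.zip (pvCipher keyword)).map Prod.fst).map (fun c : Char => String.ofList [c])) := by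
    simp [List.map_map, Function.comp]
  rw [this]
  exact ((pv_zip_fst_sublist _ _).nodup pv_nodup_alpha).map pv_mk_inj

lemma pv_nodup_vals (keyword : String) :
    ((pvAlpha.zip (pvCipher keyword)).map (fun p : Char × Char => String.ofList [p.2])).Nodup := by
  have : ((pvAlpha.zip (pvCipher keyword)).map (fun p : Char × Char => String.ofList [p.2]))
      = (((pvAlpha.zip (pvCipher keyword)).map Prod.snd).map (fun c : Char => String.ofList [c])) := by
    simp [List.map_map, Function.comp]
  rw [this]
  exact ((pv_zip_snd_sublist _ _).nodup (pv_nodup_cipher keyword)).map pv_mk_inj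

lemma pv_pairfold0 (l : List Char) :
    l.foldl (fun sc ch =>
      if PySem.Set.contains sc.1 ch then sc else (PySem.Set.add sc.1 ch, sc.2 ++ [ch]))
      (PySem.Set.empty, ([] : List Char))
    = (PySem.Set.ofList l, PySem.Set.ofList l) := pv_pairfold l []

-- a dict built over fresh distinct keys lists exactly its insertions
lemma pv_items_zipfold (l : List (Char × Char))
    (h : (l.map (fun p : Char × Char => String.ofList [p.1])).Nodup) :
    (l.foldl (fun d p => d.insert (String.ofList [p.1]) (String.ofList [p.2])) PySem.Dict.empty).items
    = l.map (fun p => (String.ofList [p.1], String.ofList [p.2])) := by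
  simpa using PySem.Dict.items_foldl_insert_fresh l (fun p => String.ofList [p.1])
    (fun p => String.ofList [p.2]) PySem.Dict.empty (fun a _ => PySem.Dict.contains_empty _) h

lemma pv_items_swapfold (l : List (String × String)) (h : (l.map Prod.snd).Nodup) :
    (l.foldl (fun d p => d.insert p.2 p.1) PySem.Dict.empty).items
    = l.map (fun p => (p.2, p.1)) := by
  simpa using PySem.Dict.items_foldl_insert_fresh l Prod.snd Prod.fst PySem.Dict.empty
    (fun a _ => PySem.Dict.contains_empty _) h

lemma pv_items_ofList (l : List (String × String)) (h : (l.map Prod.fst).Nodup) :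
    (PySem.Dict.ofList l).items = l := by
  simpa using PySem.Dict.items_foldl_insert_fresh l Prod.fst Prod.snd PySem.Dict.empty
    (fun a _ => PySem.Dict.contains_empty _) h

lemma pv_nodup_inv_keys (keyword : String) :
    (((pvCipher keyword).zip pvAlpha).map (fun p : Char × Char => String.ofList [p.1])).Nodup := by
  have h : ((pvCipher keyword).zip pvAlpha).map (fun p : Char × Char => String.ofList [p.1])
      = (((pvCipher keyword).zip pvAlpha).map Prod.fst).map (fun c : Char => String.ofList [c]) := by
    simp [List.map_map, Function.comp]
  rw [h]
  exact ((pv_zip_fst_sublist _ _).nodup (pv_nodup_cipher keyword)).map pv_mk_inj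

theorem pv_A_eq (keyword : String) :
    build_cipher_from_keyword keyword = (pvMapped keyword, pvInvd keyword) := by
  simp only [build_cipher_from_keyword, pv_pairfold0, pv_skipfold, pvMapped, pvInvd, pvCipher, pvU]
  rw [pv_items_zipfold _ (by simpa only [pvCipher, pvU] using pv_nodup_keys keyword)]
  rw [pv_items_swapfold _ (by
        have := pv_nodup_vals keyword
        simp only [pvCipher, pvU] at this
        simpa [List.map_map, Function.comp] using this)]
  simp [List.map_map, Function.comp]

-- the 26 alphabet letters are exactly the chars with codes 65..90
lemma pv_mem_of_range (n : Nat) (h1 : 65 ≤ n) (h2 : n ≤ 90) : Char.ofNat n ∈ pvAlpha := by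
  have : pvAlpha = (List.range 26).map (fun k => Char.ofNat (65 + k)) := by decide
  rw [this]
  exact List.mem_map.mpr ⟨n - 65, List.mem_range.mpr (by omega), by congr 1; omega⟩

-- every uppercased alphabetic character is one of the 26 alphabet letters
lemma pv_upper_mem (c : Char) (h : PySem.Chars.isalpha c = true) :
    PySem.Chars.upperChar c ∈ pvAlpha := by
  have hval : c.val.toNat = c.toNat := rfl
  simp only [PySem.Chars.isalpha, PySem.Chars.isupper, PySem.Chars.islower, Bool.or_eq_true,
    Bool.and_eq_true, decide_eq_true_eq, Char.le_def, UInt32.le_iff_toNat_le] at h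
  rcases h with ⟨h1, h2⟩ | ⟨h1, h2⟩
  · have hl : PySem.Chars.islower c = false := by
      simp only [PySem.Chars.islower, Bool.and_eq_false_iff,
        decide_eq_false_iff_not, Char.le_def, UInt32.le_iff_toNat_le]
      left
      show ¬ ('a'.val.toNat ≤ c.val.toNat)
      have ha : 'a'.val.toNat = 97 := rfl
      have hz : 'Z'.val.toNat = 90 := rfl
      omega
    rw [PySem.Chars.upperChar, hl, if_neg (by simp)]
    have he := Char.ofNat_toNat c
    have ha : 'A'.val.toNat = 65 := rfl
    have hz : 'Z'.val.toNat = 90 := rfl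
    have hm := pv_mem_of_range c.toNat (by omega) (by omega)
    rwa [he] at hm
  · rw [PySem.Chars.upperChar, if_pos (by
      simp only [PySem.Chars.islower, Bool.and_eq_true, decide_eq_true_eq, Char.le_def,
        UInt32.le_iff_toNat_le]
      exact ⟨h1, h2⟩)]
    have ha : 'a'.val.toNat = 97 := rfl
    have hz : 'z'.val.toNat = 122 := rfl
    exact pv_mem_of_range _ (by omega) (by omega)

-- elements of uniq are alphabet letters
lemma pv_uniq_subset (keyword : String) : ∀ c ∈ pvU keyword, c ∈ pvAlpha := by
  intro c hc
  rw [pvU, PySem.Set.mem_ofList] at hc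
  obtain ⟨d, hd, rfl⟩ := List.mem_map.mp hc
  exact pv_upper_mem d (List.of_mem_filter hd)

-- the first occurrence index of the i-th element of a duplicate-free list is i
lemma pv_index?_getElem (U : List Char) (h : U.Nodup) (i : Nat) (hi : i < U.length) :
    PySem.List.index? U U[i] = some i := by
  rw [PySem.List.index?_eq_idxOf?, List.idxOf?_eq_some_iff]
  exact ⟨hi, rfl, fun j hj he => absurd (h.getElem_inj_iff.mp he) (by omega)⟩

-- the sort in B produces exactly A's cipher order
lemma pv_sorted_eq (keyword : String) :
    PySem.List.sorted pvAlpha (fun c =>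
      match PySem.List.index? (pvU keyword) c with
      | some i => (i : Int)
      | none => ((pvU keyword).length : Int) + (c.toNat : Int)) = pvCipher keyword := by
  apply PySem.List.sorted_eq_of_perm_of_pairwise_lt
  · -- permutation
    rw [List.perm_ext_iff_of_nodup (pv_nodup_cipher keyword) pv_nodup_alpha]
    intro a
    constructor
    · intro ha
      rcases List.mem_append.mp ha with h | h
      · exact pv_uniq_subset keyword a h
      · exact List.mem_of_mem_filter h
    · intro ha
      by_cases h : a ∈ pvU keyword
      · exact List.mem_append.mpr (Or.inl h)
      · refine List.mem_append.mpr (Or.inr (List.mem_filter.mpr ⟨ha, ?_⟩))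
        simp [PySem.Set.contains, h]
  · -- strictly increasing ranks along pvCipher
    have hU : (pvU keyword).Nodup := PySem.Set.nodup_ofList _
    rw [pvCipher, List.pairwise_append]
    refine ⟨?_, ?_, ?_⟩
    · rw [List.pairwise_iff_getElem]
      intro i j hi hj hij
      rw [pv_index?_getElem _ hU i hi, pv_index?_getElem _ hU j hj]
      show (i : Int) < (j : Int)
      exact_mod_cast hij
    · have hp : (pvAlpha.filter (fun ch => !PySem.Set.contains (pvU keyword) ch)).Pairwise (· < ·) :=
        (show pvAlpha.Pairwise (· < ·) by decide).sublist (List.filter_sublist)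
      refine hp.imp_of_mem ?_
      intro a b ha hb hlt
      have hna : a ∉ pvU keyword := by
        simpa [PySem.Set.contains] using (List.mem_filter.mp ha).2
      have hnb : b ∉ pvU keyword := by
        simpa [PySem.Set.contains] using (List.mem_filter.mp hb).2
      rw [(PySem.List.index?_eq_none_iff _ _).mpr hna, (PySem.List.index?_eq_none_iff _ _).mpr hnb]
      show ((pvU keyword).length : Int) + (a.toNat : Int) < ((pvU keyword).length : Int) + (b.toNat : Int)
      rw [Char.lt_def, UInt32.lt_iff_toNat_lt] at hlt
      have e1 : a.val.toNat = a.toNat := rfl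
      have e2 : b.val.toNat = b.toNat := rfl
      omega
    · intro a ha b hb
      obtain ⟨i, hi, rfl⟩ := List.mem_iff_getElem.mp ha
      rw [pv_index?_getElem _ hU i hi]
      have hnb : b ∉ pvU keyword := by
        simpa [PySem.Set.contains] using (List.mem_filter.mp hb).2
      rw [(PySem.List.index?_eq_none_iff _ _).mpr hnb]
      show (i : Int) < ((pvU keyword).length : Int) + (b.toNat : Int)
      have h1 : (i : Int) < ((pvU keyword).length : Int) := by exact_mod_cast hi
      have h2 : (0 : Int) ≤ (b.toNat : Int) := by positivity
      omega

theorem pv_B_eq (keyword : String) :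
    build_cipher_from_keyword_alt keyword = (pvMapped keyword, pvInvd keyword) := by
  simp only [build_cipher_from_keyword_alt, PySem.List.dedup_eq_ofList]
  have h := pv_sorted_eq keyword
  simp only [pvU] at h
  rw [h]
  rw [pv_items_ofList _ (by
        have := pv_nodup_keys keyword
        simpa [List.map_map, Function.comp] using this)]
  rw [pv_items_ofList _ (by
        have := pv_nodup_inv_keys keyword
        simpa [List.map_map, Function.comp] using this)]
  unfold pvMapped pvInvd
  rw [← List.zip_swap pvAlpha, List.map_map]
  rfl

theorem pv_main (keyword : String) :
    build_cipher_from_keyword keyword = build_cipher_from_keyword_alt keyword := by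
  rw [pv_A_eq, pv_B_eq]
-- ===== VERDICT (by name: the statement is the Claim_ definition above) =====
theorem build_cipher_from_keyword_spec : Claim_equal_build_cipher_from_keyword := by
  intro keyword _
  unfold Spec_build_cipher_from_keyword
  exact pv_main keyword
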